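-- pv_equiv track=rewrite | github.com/sree-revoori/Ciphers | cryptoLibrary/Vigenere_Cipher.py | make_cosets
-- ===== SOURCE A (Python) =====
-- def make_cosets(text, n):
--     """Makes cosets out of a ciphertext given a key length; should return an array of strings"""
--     coset = [None]*n
--     lis = list(text)
--     for x in range(0, n) :
--       i = x
--       stri = ""
--       while (i)<len(lis)-1:
--         stri += lis[i]
--         i += n
--       coset[x] = stri
--     return coset
-- ===== SOURCE B (Python) =====
-- def make_cosets(text, n):
--     """Makes cosets out of a ciphertext given a key length; should return an array of strings"""
--     if n <= 0:
--         return []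
--     buckets = [[] for _ in range(n)]
--     for i, c in enumerate(text[:-1]):
--         buckets[i % n].append(c)
--     return ["".join(b) for b in buckets]
-- ===== Notes on version B (the rewrite author's own statement) =====
-- stated objective: alternative
-- what changed: Replaces A's n separate strided scans (one while-loop per coset) with a single forward pass over text[:-1] that distributes each character into bucket i % n, then joins the buckets.
import Mathlib
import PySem

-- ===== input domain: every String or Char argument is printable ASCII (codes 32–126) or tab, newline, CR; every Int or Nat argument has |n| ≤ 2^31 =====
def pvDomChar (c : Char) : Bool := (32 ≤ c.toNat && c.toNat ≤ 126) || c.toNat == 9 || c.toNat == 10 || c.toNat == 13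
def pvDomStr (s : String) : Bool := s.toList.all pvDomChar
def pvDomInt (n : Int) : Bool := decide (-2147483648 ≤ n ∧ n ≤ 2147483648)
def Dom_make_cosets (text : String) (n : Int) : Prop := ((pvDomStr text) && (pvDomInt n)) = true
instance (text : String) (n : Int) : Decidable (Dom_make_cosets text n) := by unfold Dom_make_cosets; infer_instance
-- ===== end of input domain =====

-- B replaces A's n separate strided while-loop scans with a single forward pass over
-- text[:-1] that buckets each character by index mod n (alternative decomposition, same cost).


-- ===== PORT A =====
-- the inner 'while i < len(lis)-1: stri += lis[i]; i += n' loop; fuel = lis.length is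
-- enough: whenever the loop runs, n ≥ 1 (x comes from range(0, n)), so there are at
-- most len(lis)-1 iterations.  lis[i] is exact as pyGetD: the branch is only taken
-- with 0 ≤ i < len(lis)-1, where Python's indexing cannot raise.
def pvWhileA (lis : List Char) (n : Int) : Nat → Int → List Char → List Char
  | 0, _, acc => acc
  | fuel+1, i, acc =>
    if i < (lis.length : Int) - 1 then
      pvWhileA lis n fuel (i + n) (acc ++ [PySem.List.pyGetD lis i ' '])
    else acc

-- 'coset = [None]*n' then 'for x in range(0, n): coset[x] = stri' assigns every slot
-- exactly once, in order: that loop is the map over range(0, n).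
def make_cosets (text : String) (n : Int) : List String :=
  let lis := text.toList
  (PySem.List.pyRange 0 n 1).map (fun x => String.ofList (pvWhileA lis n lis.length x []))

-- ===== PORT B =====
-- one fold step: buckets[i % n].append(c)
def pvStep (n : Int) (bs : List (List Char)) (p : Int × Char) : List (List Char) :=
  PySem.List.pySetD bs (PySem.Int.mod p.1 n)
    ((PySem.List.pyGetD bs (PySem.Int.mod p.1 n) []) ++ [p.2])

def make_cosets_alt (text : String) (n : Int) : List String :=
  if n ≤ 0 then []
  else
    let body := PySem.List.slice text.toList none (some (-1))
    let buckets := (PySem.List.enumerate body 0).foldl (pvStep n) (List.replicate n.toNat [])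
    buckets.map (fun b => String.ofList b)

-- ===== PRECONDITION & SPEC =====
def Spec_make_cosets (text : String) (n : Int) (out : List String) : Prop := out = make_cosets_alt text n
instance (text : String) (n : Int) (out : List String) : Decidable (Spec_make_cosets text n out) := by unfold Spec_make_cosets; infer_instance

-- ===== CLAIM (what is proved, stated in full; the proofs are below) =====
def Claim_equal_make_cosets : Prop := ∀ (text : String) (n : Int), Dom_make_cosets text n → Spec_make_cosets text n (make_cosets text n)

-- ===== LEMMAS AND PROOFS =====

-- the first index ≥ a in residue class a (mod m) splits off the stride filter
lemma pv_filter_stride (L m a : ℕ) (hm : 1 ≤ m) (ha : a < L) :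
    (List.range L).filter (fun j => decide (a ≤ j ∧ j % m = a % m))
      = a :: (List.range L).filter (fun j => decide (a + m ≤ j ∧ j % m = a % m)) := by
  induction L with
  | zero => omega
  | succ L ih =>
    rw [List.range_succ, List.filter_append, List.filter_append]
    rcases Nat.lt_succ_iff_lt_or_eq.mp ha with hL | hL
    · rw [ih hL]
      have hlast : (List.filter (fun j => decide (a ≤ j ∧ j % m = a % m)) [L])
                 = (List.filter (fun j => decide (a + m ≤ j ∧ j % m = a % m)) [L]) := by
        simp only [List.filter_cons, List.filter_nil]
        by_cases h1 : L % m = a % m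
        · have hdvd : m ∣ L - a := (Nat.modEq_iff_dvd' (le_of_lt hL)).mp h1.symm
          obtain ⟨k, hk⟩ := hdvd
          have hk1 : 1 ≤ k := by
            cases k with
            | zero => simp at hk; omega
            | succ k => exact Nat.succ_le_succ (Nat.zero_le _)
          have hmk : m ≤ m * k := Nat.le_mul_of_pos_right m hk1
          have : a + m ≤ L := by omega
          simp [h1, this, le_of_lt hL]
        · simp [h1]
      rw [hlast, List.cons_append]
    · subst hL
      have e1 : (List.range a).filter (fun j => decide (a ≤ j ∧ j % m = a % m)) = [] := by
        rw [List.filter_eq_nil_iff]; intro j hj; simp only [List.mem_range] at hj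
        simp; omega
      have e2 : (List.range a).filter (fun j => decide (a + m ≤ j ∧ j % m = a % m)) = [] := by
        rw [List.filter_eq_nil_iff]; intro j hj; simp only [List.mem_range] at hj
        simp; omega
      rw [e1, e2]
      simp only [List.filter_cons, List.filter_nil]
      simp only [le_refl, true_and, decide_eq_true_eq]
      simp
      omega

-- no in-class index ≥ a exists below L when L ≤ a
lemma pv_filter_out (L m a : ℕ) (ha : L ≤ a) :
    (List.range L).filter (fun j => decide (a ≤ j ∧ j % m = a % m)) = [] := by
  rw [List.filter_eq_nil_iff]; intro j hj; simp only [List.mem_range] at hj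
  simp; omega

-- A's while-loop collects exactly the in-class indices ≥ i, in increasing order
lemma pvWhileA_eq (lis : List Char) (n : Int) (hn : 1 ≤ n)
    (fuel : Nat) (i : Int) (hi : 0 ≤ i) (acc : List Char)
    (hfuel : lis.length - 1 ≤ i.toNat + fuel) :
    pvWhileA lis n fuel i acc
      = acc ++ ((List.range (lis.length - 1)).filter
          (fun j => decide (i.toNat ≤ j ∧ j % n.toNat = i.toNat % n.toNat))).map
          (fun j => lis.getD j ' ') := by
  induction fuel generalizing i acc with
  | zero =>
    rw [pvWhileA, pv_filter_out _ _ _ (by omega)]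
    simp
  | succ fuel ih =>
    rw [pvWhileA]
    by_cases h : i < (lis.length : Int) - 1
    · rw [if_pos h]
      have hiL : i.toNat < lis.length - 1 := by omega
      rw [ih (i + n) (by omega) _ (by omega)]
      have ht : (i + n).toNat = i.toNat + n.toNat := by omega
      have hmod : (i.toNat + n.toNat) % n.toNat = i.toNat % n.toNat := Nat.add_mod_right _ _
      rw [ht]
      simp only [hmod]
      rw [pv_filter_stride _ _ _ (by omega) hiL]
      have hget : PySem.List.pyGetD lis i ' ' = lis.getD i.toNat ' ' := by
        rw [PySem.List.pyGetD_eq_getElem lis ' ' hi (by omega), List.getD_eq_getElem _ _ (by omega)]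
      rw [List.map_cons, hget, List.append_assoc]
      rfl
    · rw [if_neg h, pv_filter_out _ _ _ (by omega)]
      simp

-- B's fold step is a set at the residue index
lemma pvStep_eq (n : Int) (hn : 1 ≤ n) (bs : List (List Char)) (s : Nat) (c : Char) :
    pvStep n bs ((s : Int), c)
      = bs.set (s % n.toNat) (bs.getD (s % n.toNat) [] ++ [c]) := by
  obtain ⟨m, rfl⟩ : ∃ m : ℕ, n = (m : Int) := ⟨n.toNat, by omega⟩
  rw [pvStep]
  simp only [PySem.Int.mod_natCast, PySem.List.pySetD_natCast, PySem.List.pyGetD_natCast,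
    Int.toNat_natCast]

-- B's fold distributes each character into its residue bucket
lemma pvFold_eq (cs : List Char) (n : Int) (hn : 1 ≤ n) :
    ∀ (s : Nat) (bs : List (List Char)), bs.length = n.toNat →
    (PySem.List.enumerate cs (s : Int)).foldl (pvStep n) bs
      = (List.range n.toNat).map (fun x => bs.getD x [] ++
          ((List.range cs.length).filter (fun j => decide ((s + j) % n.toNat = x))).map
            (fun j => cs.getD j ' ')) := by
  induction cs with
  | nil =>
    intro s bs hlen
    simp only [PySem.List.enumerate_nil, List.foldl_nil, List.length_nil, List.range_zero,
      List.filter_nil, List.map_nil, List.append_nil]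
    apply List.ext_getElem
    · simp [hlen]
    · intro k h1 h2
      simp only [List.getElem_map, List.getElem_range]
      rw [List.getD_eq_getElem _ _ (by simp at h2; omega)]
  | cons c cs ih =>
    intro s bs hlen
    rw [PySem.List.enumerate_cons, List.foldl_cons]
    have hcast : (s : Int) + 1 = ((s + 1 : Nat) : Int) := by push_cast; ring
    rw [pvStep_eq n hn bs s c, hcast, ih (s+1) _ (by simp [hlen])]
    apply List.map_congr_left
    intro x hx
    simp only [List.mem_range] at hx
    -- split the new index list: j = 0 contributes c iff s % n = x
    have hsplit : (List.range (cs.length + 1)).filter (fun j => decide ((s + j) % n.toNat = x))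
        = ((if s % n.toNat = x then [0] else []) ++
           ((List.range cs.length).filter (fun j => decide ((s + 1 + j) % n.toNat = x))).map Nat.succ) := by
      rw [List.range_succ_eq_map, List.filter_cons, List.filter_map]
      have hp : ((fun j => decide ((s + j) % n.toNat = x)) ∘ Nat.succ)
              = (fun j => decide ((s + 1 + j) % n.toNat = x)) := by
        funext j
        simp only [Function.comp_apply]
        have hadd : s + Nat.succ j = s + 1 + j := by omega
        rw [hadd]
      rw [hp]
      simp only [Nat.add_zero]
      by_cases hd : s % n.toNat = x <;> simp [hd]
    simp only [List.length_cons]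
    rw [hsplit, List.map_append, List.map_map]
    have hcomp : ((fun j => (c :: cs).getD j ' ') ∘ Nat.succ) = (fun j => cs.getD j ' ') := by
      funext j; simp
    rw [hcomp]
    have hxlen : x < bs.length := by rw [hlen]; exact hx
    by_cases hsx : s % n.toNat = x
    · rw [if_pos hsx, List.map_cons, List.map_nil, List.getD_cons_zero]
      have hget : (bs.set (s % n.toNat) (bs.getD (s % n.toNat) [] ++ [c])).getD x []
          = bs.getD x [] ++ [c] := by
        subst hsx
        rw [List.getD_eq_getElem _ _ (by simpa using hxlen),
            List.getElem_set_self (by simpa using hxlen)]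
      rw [hget, List.append_assoc]
    · rw [if_neg hsx, List.map_nil, List.nil_append]
      have hget : (bs.set (s % n.toNat) (bs.getD (s % n.toNat) [] ++ [c])).getD x []
          = bs.getD x [] := by
        rw [List.getD_eq_getElem _ _ (by simpa using hxlen),
            List.getElem_set_ne hsx (by simpa using hxlen),
            ← List.getD_eq_getElem bs _ hxlen]
      rw [hget]

-- ===== VERDICT (by name: the statement is the Claim_ definition above) =====
theorem make_cosets_spec : Claim_equal_make_cosets := by
  intro text n _
  show make_cosets text n = make_cosets_alt text n
  by_cases hn : n ≤ 0
  · simp [make_cosets, make_cosets_alt, hn, PySem.List.pyRange_one_eq_nil]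
  · have hn1 : 1 ≤ n := by omega
    rw [make_cosets, make_cosets_alt, if_neg hn]
    simp only [PySem.List.slice_to_neg_one]
    rw [show (0 : Int) = ((0 : Nat) : Int) from rfl,
        pvFold_eq text.toList.dropLast n hn1 0 _ (by simp)]
    simp only [Nat.cast_zero]
    rw [PySem.List.pyRange_one 0 n, List.map_map, List.map_map]
    simp only [zero_add, Int.sub_zero]
    apply List.map_congr_left
    intro k hk
    simp only [List.mem_range] at hk
    simp only [Function.comp_apply]
    rw [pvWhileA_eq text.toList n hn1 text.toList.length ((k : Nat) : Int) (by positivity) [] (by simp; omega)]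
    rw [Int.toNat_natCast]
    simp only [List.nil_append]
    congr 1
    rw [List.length_dropLast]
    have hfilt : (List.range (text.toList.length - 1)).filter
          (fun j => decide (k ≤ j ∧ j % n.toNat = k % n.toNat))
        = (List.range (text.toList.length - 1)).filter (fun j => decide (j % n.toNat = k)) := by
      apply List.filter_congr
      intro j hj
      simp only [decide_eq_decide]
      have hkm : k % n.toNat = k := Nat.mod_eq_of_lt hk
      constructor
      · rintro ⟨-, h2⟩; omega
      · intro h2
        exact ⟨by have := Nat.mod_le j n.toNat; omega, by omega⟩
    rw [hfilt]
    have hrep : (List.replicate n.toNat ([] : List Char)).getD k [] = [] := by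
      rw [List.getD_eq_getElem _ _ (by simpa using hk), List.getElem_replicate]
    rw [hrep, List.nil_append]
    apply List.map_congr_left
    intro j hj
    have hjL : j < text.toList.length - 1 := List.mem_range.mp (List.mem_of_mem_filter hj)
    rw [List.getD_eq_getElem _ _ (show j < text.toList.length by omega),
        List.getD_eq_getElem _ _ (show j < text.toList.dropLast.length by
          rw [List.length_dropLast]; omega),
        List.getElem_dropLast]
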